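-- pv_equiv track=rewrite | github.com/aneetaraju-bot/Monthly-Review-Trend | app.py | kpi_guess_options
-- ===== SOURCE A (Python) =====
-- def kpi_guess_options(all_metrics):
--     # Suggest likely matches; user can adjust in UI
--     key_map = {
--         "AVERAGE of Course completion %": ["completion"],
--         "AVERAGE of NPS": ["nps"],
--         "SUM of No of Placements(Monthly)": ["placement", "placements"],
--         "AVERAGE of Reg to Placement %": ["reg to placement"],
--         "AVERAGE of Active Student %": ["active student"],
--         "AVERAGE of Avg Mentor Rating": ["mentor", "rating"],
--     }
--     pre = {}
--     for k, needles in key_map.items():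
--         picks = [m for m in all_metrics if any(n in m.lower() for n in needles)]
--         pre[k] = picks
--     return pre
-- ===== SOURCE B (Python) =====
-- def kpi_guess_options(all_metrics):
--     # Two-stage: one tagging pass over the metrics builds an index of which KPI
--     # slots each metric hits; the result dict is then assembled from the tags
--     # alone, with no further string matching.
--     keys = ["AVERAGE of Course completion %", "AVERAGE of NPS",
--             "SUM of No of Placements(Monthly)", "AVERAGE of Reg to Placement %",
--             "AVERAGE of Active Student %", "AVERAGE of Avg Mentor Rating"]
--     needles = [["completion"], ["nps"], ["placement", "placements"],
--                ["reg to placement"], ["active student"], ["mentor", "rating"]]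
--     # Stage 1: tag each metric with the list of KPI indices whose needles match.
--     tagged = [(m, [i for i, ns in enumerate(needles)
--                    if any(n in m.lower() for n in ns)])
--               for m in all_metrics]
--     # Stage 2: select each bucket from the tags (index membership only).
--     return {k: [m for m, hits in tagged if i in hits] for i, k in enumerate(keys)}
-- ===== Notes on version B (the rewrite author's own statement) =====
-- stated objective: alternative
-- what changed: B replaces A's per-key filtering of all_metrics by a two-stage pipeline: one tagging pass builds an index pairing each metric with the list of KPI indices whose needles match it, then the result dict is assembled from those tags by index membership alone, with no further string matching.
import Mathlib
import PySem

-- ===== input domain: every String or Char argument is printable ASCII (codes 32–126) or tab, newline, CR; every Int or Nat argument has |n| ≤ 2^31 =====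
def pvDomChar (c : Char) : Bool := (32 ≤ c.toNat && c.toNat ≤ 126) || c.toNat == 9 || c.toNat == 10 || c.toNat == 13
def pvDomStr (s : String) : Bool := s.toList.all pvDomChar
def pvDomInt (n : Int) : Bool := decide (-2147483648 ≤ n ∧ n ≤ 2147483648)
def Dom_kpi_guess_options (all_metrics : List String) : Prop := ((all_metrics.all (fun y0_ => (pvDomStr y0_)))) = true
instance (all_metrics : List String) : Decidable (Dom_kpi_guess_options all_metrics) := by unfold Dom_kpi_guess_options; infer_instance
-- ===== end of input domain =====

-- B replaces A's per-key filtering of all_metrics by a two-stage pipeline: one tagging pass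
-- builds an index (metric, matching-KPI-indices), then the dict is assembled from the tags
-- with no further string matching ('alternative', same asymptotic cost); return values proved equal.

-- ===== PORT A =====
-- A's dict literal key_map, as an association list
def pvKeyMap : List (String × List String) :=
  [ ("AVERAGE of Course completion %", ["completion"]),
    ("AVERAGE of NPS", ["nps"]),
    ("SUM of No of Placements(Monthly)", ["placement", "placements"]),
    ("AVERAGE of Reg to Placement %", ["reg to placement"]),
    ("AVERAGE of Active Student %", ["active student"]),
    ("AVERAGE of Avg Mentor Rating", ["mentor", "rating"]) ]

def kpi_guess_options (all_metrics : List String) : List (String × List String) :=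
  (pvKeyMap.foldl
    (fun pre kv =>
      pre.insert kv.1
        (all_metrics.filter (fun m => kv.2.any (fun n => PySem.Str.isIn n (PySem.Str.lower m)))))
    (PySem.Dict.empty : PySem.Dict String (List String))).items

-- ===== PORT B =====
-- B's two parallel literal lists
def pvKeys : List String :=
  [ "AVERAGE of Course completion %", "AVERAGE of NPS", "SUM of No of Placements(Monthly)",
    "AVERAGE of Reg to Placement %", "AVERAGE of Active Student %", "AVERAGE of Avg Mentor Rating" ]

def pvNeedles : List (List String) :=
  [ ["completion"], ["nps"], ["placement", "placements"],
    ["reg to placement"], ["active student"], ["mentor", "rating"] ]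

def kpi_guess_options_alt (all_metrics : List String) : List (String × List String) :=
  -- Stage 1: tag each metric with the list of KPI indices whose needles match
  let tagged := all_metrics.map (fun m =>
    (m, ((PySem.List.enumerate pvNeedles).filter
          (fun p => p.2.any (fun n => PySem.Str.isIn n (PySem.Str.lower m)))).map Prod.fst))
  -- Stage 2: select each bucket from the tags (index membership only)
  (PySem.List.enumerate pvKeys).map
    (fun p => (p.2, (tagged.filter (fun q => q.2.contains p.1)).map Prod.fst))

-- ===== PRECONDITION & SPEC =====
def Spec_kpi_guess_options (all_metrics : List String) (out : List (String × List String)) : Prop := out = kpi_guess_options_alt all_metrics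
instance (all_metrics : List String) (out : List (String × List String)) : Decidable (Spec_kpi_guess_options all_metrics out) := by unfold Spec_kpi_guess_options; infer_instance

-- ===== CLAIM (what is proved, stated in full; the proofs are below) =====
def Claim_equal_kpi_guess_options : Prop := ∀ (all_metrics : List String), Dom_kpi_guess_options all_metrics → Spec_kpi_guess_options all_metrics (kpi_guess_options all_metrics)

-- ===== LEMMAS AND PROOFS =====

-- does metric m hit a bucket with needle list ns?
def pvHit (ns : List String) (m : String) : Bool :=
  ns.any (fun n => PySem.Str.isIn n (PySem.Str.lower m))

-- B's stage-1 tag of a single metric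
def pvTags (m : String) : List Int :=
  ((PySem.List.enumerate pvNeedles).filter (fun p => p.2.any (fun n => PySem.Str.isIn n (PySem.Str.lower m)))).map Prod.fst

lemma pvTags_eq (m : String) :
    pvTags m = (if pvHit ["completion"] m then [(0:Int)] else [])
      ++ (if pvHit ["nps"] m then [1] else [])
      ++ (if pvHit ["placement", "placements"] m then [2] else [])
      ++ (if pvHit ["reg to placement"] m then [3] else [])
      ++ (if pvHit ["active student"] m then [4] else [])
      ++ (if pvHit ["mentor", "rating"] m then [5] else []) := by
  simp only [pvTags, pvNeedles, PySem.List.enumerate_cons, PySem.List.enumerate_nil,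
    List.filter_cons, List.filter_nil, pvHit]
  split_ifs <;> simp

lemma pvTags_c0 (m : String) : (pvTags m).contains (0:Int) = pvHit ["completion"] m := by
  rw [pvTags_eq]; split_ifs <;> simp_all
lemma pvTags_c1 (m : String) : (pvTags m).contains (1:Int) = pvHit ["nps"] m := by
  rw [pvTags_eq]; split_ifs <;> simp_all
lemma pvTags_c2 (m : String) : (pvTags m).contains (2:Int) = pvHit ["placement", "placements"] m := by
  rw [pvTags_eq]; split_ifs <;> simp_all
lemma pvTags_c3 (m : String) : (pvTags m).contains (3:Int) = pvHit ["reg to placement"] m := by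
  rw [pvTags_eq]; split_ifs <;> simp_all
lemma pvTags_c4 (m : String) : (pvTags m).contains (4:Int) = pvHit ["active student"] m := by
  rw [pvTags_eq]; split_ifs <;> simp_all
lemma pvTags_c5 (m : String) : (pvTags m).contains (5:Int) = pvHit ["mentor", "rating"] m := by
  rw [pvTags_eq]; split_ifs <;> simp_all

lemma pvBucket (ms : List String) (i : Int) (ns : List String)
    (h : ∀ m, (pvTags m).contains i = pvHit ns m) :
    ((ms.map (fun m => (m, pvTags m))).filter (fun q => q.2.contains i)).map Prod.fst
      = ms.filter (pvHit ns) := by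
  rw [List.filter_map, List.map_map]
  rw [show (Prod.fst ∘ fun m => (m, pvTags m)) = id from rfl, List.map_id]
  exact List.filter_congr (fun m _ => h m)

lemma A_eq (ms : List String) :
    kpi_guess_options ms =
      [ ("AVERAGE of Course completion %", ms.filter (pvHit ["completion"])),
        ("AVERAGE of NPS", ms.filter (pvHit ["nps"])),
        ("SUM of No of Placements(Monthly)", ms.filter (pvHit ["placement", "placements"])),
        ("AVERAGE of Reg to Placement %", ms.filter (pvHit ["reg to placement"])),
        ("AVERAGE of Active Student %", ms.filter (pvHit ["active student"])),
        ("AVERAGE of Avg Mentor Rating", ms.filter (pvHit ["mentor", "rating"])) ] := by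
  simp [kpi_guess_options, pvKeyMap, PySem.Dict.insert, PySem.Dict.empty, PySem.Dict.contains]
  refine ⟨?_, ?_, ?_, ?_, ?_, ?_⟩ <;>
    exact List.filter_congr (fun m _ => by simp [pvHit, PySem.Str.isIn, PySem.Str.lower])

lemma B_eq (ms : List String) :
    kpi_guess_options_alt ms =
      [ ("AVERAGE of Course completion %", ms.filter (pvHit ["completion"])),
        ("AVERAGE of NPS", ms.filter (pvHit ["nps"])),
        ("SUM of No of Placements(Monthly)", ms.filter (pvHit ["placement", "placements"])),
        ("AVERAGE of Reg to Placement %", ms.filter (pvHit ["reg to placement"])),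
        ("AVERAGE of Active Student %", ms.filter (pvHit ["active student"])),
        ("AVERAGE of Avg Mentor Rating", ms.filter (pvHit ["mentor", "rating"])) ] := by
  have h0 : kpi_guess_options_alt ms
      = (PySem.List.enumerate pvKeys).map
          (fun p => (p.2, ((ms.map (fun m => (m, pvTags m))).filter
              (fun q => q.2.contains p.1)).map Prod.fst)) := rfl
  rw [h0]
  simp only [pvKeys, PySem.List.enumerate_cons, PySem.List.enumerate_nil,
    List.map_cons, List.map_nil, List.cons.injEq, Prod.mk.injEq, true_and, and_true]
  exact ⟨pvBucket ms 0 _ pvTags_c0, pvBucket ms 1 _ pvTags_c1, pvBucket ms 2 _ pvTags_c2,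
    pvBucket ms 3 _ pvTags_c3, pvBucket ms 4 _ pvTags_c4, pvBucket ms 5 _ pvTags_c5⟩

theorem kpi_guess_options_spec : Claim_equal_kpi_guess_options := by
  intro ms _
  unfold Spec_kpi_guess_options
  rw [A_eq, B_eq]
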